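-- pv_equiv track=rewrite | github.com/CivilizedWork/Tommy-J | Day_08/_8thday01.py | is_duplicates
-- ===== SOURCE A (Python) =====
-- def is_duplicates(tested_string):
--     char_list = []
--     bool_list = []
--     for i in tested_string:
--         if i not in char_list:
--             char_list.append(i)
--             bool_list.append(False)
--         else:
--             bool_list[char_list.index(i)] = True
--     for i in bool_list:
--         if not i:
--             return False
--     return True
-- ===== SOURCE B (Python) =====
-- def is_duplicates(tested_string):
--     s = sorted(tested_string)
--     while s:
--         k = 1
--         while k < len(s) and s[k] == s[0]:
--             k += 1
--         if k == 1:
--             return False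
--         s = s[k:]
--     return True
-- ===== Notes on version B (the rewrite author's own statement) =====
-- stated objective: alternative
-- what changed: Replaces A's parallel char_list/bool_list bookkeeping with inner membership/index scans by sorting the characters and scanning the sorted sequence run by run, failing on the first run of length 1.
import Mathlib
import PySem

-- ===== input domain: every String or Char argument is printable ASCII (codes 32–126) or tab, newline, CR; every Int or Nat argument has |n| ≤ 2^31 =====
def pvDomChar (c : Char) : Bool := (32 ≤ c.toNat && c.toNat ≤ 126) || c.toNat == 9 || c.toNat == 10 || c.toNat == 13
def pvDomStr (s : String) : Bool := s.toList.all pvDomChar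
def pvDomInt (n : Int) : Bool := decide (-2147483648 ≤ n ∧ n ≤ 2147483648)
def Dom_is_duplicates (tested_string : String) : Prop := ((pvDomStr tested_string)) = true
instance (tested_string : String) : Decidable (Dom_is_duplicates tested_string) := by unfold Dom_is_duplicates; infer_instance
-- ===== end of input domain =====

-- B uses a different algorithm: sort the characters, then scan the sorted list
-- run by run, returning False as soon as some run has length 1 (alternative; not faster).


-- ===== PORT A =====
-- first loop of A: builds char_list / bool_list
def isDupScan : List Char → List Char → List Bool → List Char × List Bool
  | [], cl, bl => (cl, bl)
  | i :: rest, cl, bl =>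
    if i ∉ cl then
      isDupScan rest (cl ++ [i]) (bl ++ [false])
    else
      -- bool_list[char_list.index(i)] = True; i ∈ cl in this branch, so index? is some
      isDupScan rest cl (bl.set ((PySem.List.index? cl i).getD 0) true)

-- second loop of A: 'for i in bool_list: if not i: return False' then 'return True'
def isDupCheck : List Bool → Bool
  | [] => true
  | b :: rest => if !b then false else isDupCheck rest

def is_duplicates (tested_string : String) : Bool :=
  isDupCheck (isDupScan tested_string.toList [] []).2

-- ===== PORT B =====
-- inner while loop of B: 'k = 1; while k < len(s) and s[k] == s[0]: k += 1' gives
-- k = 1 + runLen s[0] (tail of s): the length of the leading run of s[0] past index 0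
def runLen (c : Char) : List Char → Nat
  | [] => 0
  | x :: r => if x = c then runLen c r + 1 else 0

-- outer while loop of B: check the current run's length, then continue on s[k:]
def scanRuns : List Char → Bool
  | [] => true
  | c :: rest =>
    let k := 1 + runLen c rest
    if k = 1 then false else scanRuns ((c :: rest).drop k)
termination_by l => l.length
decreasing_by
  simp only [List.length_drop, List.length_cons]
  omega

def is_duplicates_alt (tested_string : String) : Bool :=
  scanRuns (PySem.List.sorted tested_string.toList (fun x => x) false)

-- ===== PRECONDITION & SPEC =====
def Spec_is_duplicates (tested_string : String) (out : Bool) : Prop := out = is_duplicates_alt tested_string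
instance (tested_string : String) (out : Bool) : Decidable (Spec_is_duplicates tested_string out) := by unfold Spec_is_duplicates; infer_instance

-- ===== CLAIM (what is proved, stated in full; the proofs are below) =====
def Claim_equal_is_duplicates : Prop := ∀ (tested_string : String), Dom_is_duplicates tested_string → Spec_is_duplicates tested_string (is_duplicates tested_string)

-- ===== LEMMAS AND PROOFS =====

-- ---- A-side: the scan produces, for the ordered dedup of the input, the flags '2 ≤ count' ----

-- setting the entry at i's index to true, on a nodup list, is a pointwise map update
lemma map_set_idxOf (l : List Char) (f : Char → Bool) (i : Char)
    (hnd : l.Nodup) (hm : i ∈ l) :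
    (l.map f).set (l.idxOf i) true = l.map (fun c => if c = i then true else f c) := by
  induction l with
  | nil => cases hm
  | cons x xs ih =>
    rcases List.nodup_cons.mp hnd with ⟨hx, hxs⟩
    by_cases hxi : x = i
    · subst hxi
      rw [List.idxOf_cons_self]
      simp only [List.map_cons, List.set_cons_zero]
      congr 1
      exact (List.map_congr_left fun c hc => by
        have hcx : ¬ c = x := fun h => hx (h ▸ hc)
        simp [hcx]).symm
    · have hm' : i ∈ xs := by
        rcases List.mem_cons.mp hm with h | h
        · exact absurd h.symm hxi
        · exact h
      have hne : List.idxOf i (x :: xs) = List.idxOf i xs + 1 := by simp [hxi]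
      rw [hne]
      simp only [List.map_cons, List.set_cons_succ]
      rw [ih hxs hm']
      simp [hxi]

-- when i ∈ cl, the ported char_list.index(i) (index?.getD 0) is idxOf
lemma index_getD_eq_idxOf (cl : List Char) (i : Char) (hm : i ∈ cl) :
    (PySem.List.index? cl i).getD 0 = cl.idxOf i := by
  simp only [PySem.List.index?_eq_idxOf?]
  induction cl with
  | nil => cases hm
  | cons x t ih =>
    by_cases hxi : x = i
    · subst hxi; simp [List.idxOf?_cons, List.idxOf_cons_self]
    · have h' : i ∈ t := by
        rcases List.mem_cons.mp hm with h | h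
        · exact absurd h.symm hxi
        · exact h
      have hne : (x == i) = false := by simpa using hxi
      obtain ⟨k, hk⟩ := Option.isSome_iff_exists.mp (by rw [List.isSome_idxOf? (a := i) (l := t)]; exact h')
      have h2 := ih h'
      rw [hk] at h2
      simp [List.idxOf?_cons, List.idxOf_cons, hne, hk, ← h2]

-- appending one element to the processed prefix updates its ordered dedup by Set.add
lemma dedup_append_singleton (pre : List Char) (i : Char) :
    PySem.List.dedup (pre ++ [i]) = PySem.Set.add (PySem.List.dedup pre) i := by
  simp only [PySem.List.dedup_eq_ofList, PySem.Set.ofList_eq_foldl, List.foldl_append]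
  rfl

-- invariant of A's first loop: char_list is the ordered dedup of the processed prefix,
-- bool_list records whether each of its chars occurred at least twice so far
lemma isDupScan_inv (l pre : List Char) :
    isDupScan l (PySem.List.dedup pre) ((PySem.List.dedup pre).map (fun c => decide (2 ≤ pre.count c)))
      = (PySem.List.dedup (pre ++ l), (PySem.List.dedup (pre ++ l)).map (fun c => decide (2 ≤ (pre ++ l).count c))) := by
  induction l generalizing pre with
  | nil => simp [isDupScan]
  | cons i rest ih =>
    have hrec := ih (pre ++ [i])
    rw [List.append_assoc] at hrec
    simp only [List.singleton_append] at hrec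
    by_cases hm : i ∈ pre
    · have hmem : i ∈ PySem.List.dedup pre := (PySem.List.mem_dedup _ _).mpr hm
      have hded : PySem.List.dedup (pre ++ [i]) = PySem.List.dedup pre := by
        rw [dedup_append_singleton, PySem.Set.add_of_mem hmem]
      have hstep : ((PySem.List.dedup pre).map (fun c => decide (2 ≤ pre.count c))).set
            ((PySem.List.index? (PySem.List.dedup pre) i).getD 0) true
          = (PySem.List.dedup pre).map (fun c => decide (2 ≤ (pre ++ [i]).count c)) := by
        rw [index_getD_eq_idxOf _ _ hmem,
            map_set_idxOf _ _ _ (PySem.List.nodup_dedup pre) hmem]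
        apply List.map_congr_left
        intro c hc
        by_cases hci : c = i
        · subst hci
          have h1 : 0 < pre.count c := List.count_pos_iff.mpr hm
          simp [List.count_append]
          omega
        · have hic : ¬ i = c := fun h => hci h.symm
          simp [List.count_append, hci, hic]
      rw [hded] at hrec
      simp only [isDupScan]
      rw [if_neg (not_not_intro hmem), hstep, hrec]
      rfl
    · have hmem : i ∉ PySem.List.dedup pre := fun h => hm ((PySem.List.mem_dedup _ _).mp h)
      have hded : PySem.List.dedup (pre ++ [i]) = PySem.List.dedup pre ++ [i] := by
        rw [dedup_append_singleton, PySem.Set.add_of_not_mem hmem]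
      have hstep : (PySem.List.dedup pre).map (fun c => decide (2 ≤ pre.count c)) ++ [false]
          = (PySem.List.dedup (pre ++ [i])).map (fun c => decide (2 ≤ (pre ++ [i]).count c)) := by
        rw [hded, List.map_append]
        congr 1
        · apply List.map_congr_left
          intro c hc
          have hic : ¬ i = c := fun h => hmem (h ▸ hc)
          simp [List.count_append, hic]
        · have h0 : pre.count i = 0 := List.count_eq_zero.mpr hm
          simp [List.count_append, h0]
      simp only [isDupScan]
      rw [if_pos hmem, hstep, ← hded, hrec]
      rfl

-- A's second loop is List.all over the mapped predicate
lemma isDupCheck_map (f : Char → Bool) (l : List Char) :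
    isDupCheck (l.map f) = l.all f := by
  induction l with
  | nil => rfl
  | cons x xs ih =>
    by_cases h : f x <;> simp [isDupCheck, h, ih]

-- ---- B-side: on a sorted list, the run scan checks '2 ≤ count' for every element ----

-- the leading run: the list splits as replicate (runLen) ++ drop (runLen)
lemma runLen_split (c : Char) (l : List Char) :
    l = List.replicate (runLen c l) c ++ l.drop (runLen c l) := by
  induction l with
  | nil => rfl
  | cons x r ih =>
    by_cases h : x = c
    · subst h
      have hr : runLen x (x :: r) = runLen x r + 1 := by simp [runLen]
      rw [hr, List.replicate_succ, List.drop_succ_cons, List.cons_append]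
      exact congrArg _ ih
    · simp [runLen, h]

-- on a sorted tail whose elements are all ≥ c, the leading run of c is ALL of c:
-- its length is c's count, and c does not occur past it
lemma runLen_sorted (c : Char) (l : List Char)
    (hle : ∀ x ∈ l, c ≤ x) (hp : l.Pairwise (· ≤ ·)) :
    runLen c l = l.count c ∧ c ∉ l.drop (runLen c l) := by
  induction l with
  | nil => simp [runLen]
  | cons x r ih =>
    rcases List.pairwise_cons.mp hp with ⟨hxr, hp'⟩
    by_cases h : x = c
    · subst h
      obtain ⟨h1, h2⟩ := ih (fun y hy => hxr y hy) hp'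
      constructor
      · simp [runLen, h1]
      · simpa [runLen] using h2
    · have hcx : c < x := lt_of_le_of_ne (hle x (.head r)) (fun e => h e.symm)
      have hnm : c ∉ x :: r := by
        intro hmem
        rcases List.mem_cons.mp hmem with e | hmr
        · exact h e.symm
        · exact absurd (hxr c hmr) (not_le.mpr hcx)
      constructor
      · simp [runLen, h, List.count_eq_zero.mpr hnm]
      · simpa [runLen, h] using hnm

-- on a sorted list the run scan decides 'every character occurs at least twice'
lemma scanRuns_sorted_fuel (n : Nat) : ∀ (t : List Char), t.length ≤ n → t.Pairwise (· ≤ ·) →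
    scanRuns t = t.all (fun c => decide (2 ≤ t.count c)) := by
  induction n with
  | zero =>
    intro t hlen _
    rw [List.length_eq_zero_iff.mp (Nat.le_zero.mp hlen)]
    simp [scanRuns]
  | succ n ih =>
    intro t hlen hp
    match t, hlen, hp with
    | [], _, _ => simp [scanRuns]
    | c :: rest, hlen, hp =>
      rcases List.pairwise_cons.mp hp with ⟨hle, hp'⟩
      obtain ⟨hcount, hnotin⟩ := runLen_sorted c rest hle hp'
      set m := runLen c rest with hm
      have hsplit := runLen_split c rest
      rw [← hm] at hsplit
      set d := rest.drop m with hd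
      by_cases hm0 : m = 0
      · -- run of length 1: both sides are false
        have hPc : (decide (2 ≤ (c :: rest).count c)) = false := by
          simp [List.count_cons_self, ← hcount, hm0]
        have hL : scanRuns (c :: rest) = false := by
          rw [scanRuns]
          simp only [← hm, hm0]
          exact if_pos trivial
        have hcr : c ∉ rest := List.count_eq_zero.mp (by rw [← hcount]; exact hm0)
        have hR : ((c :: rest).all fun x => decide (2 ≤ (c :: rest).count x)) = false :=
          List.all_eq_false.mpr ⟨c, List.mem_cons_self, by simpa using hcr⟩
        rw [hL, hR]
      · -- run of length 1 + m ≥ 2: continue on the rest of the runs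
        have hdp : d.Pairwise (· ≤ ·) := hp'.sublist (List.drop_sublist m rest)
        have ihd := ih d (by
          have := List.length_drop (l := rest) (i := m)
          simp only [← hd] at this
          simp only [List.length_cons] at hlen
          omega) hdp
        -- left side steps to scanRuns d
        have hstep : scanRuns (c :: rest) = scanRuns d := by
          rw [scanRuns]
          simp only [← hm]
          rw [if_neg (by omega)]
          have : (c :: rest).drop (1 + m) = d := by
            rw [Nat.add_comm, List.drop_succ_cons, hd]
          rw [this]
        -- rewrite the full list as replicate (1+m) c ++ d
        have hfull : c :: rest = List.replicate (m + 1) c ++ d := by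
          rw [List.replicate_succ']
          calc c :: rest = c :: (List.replicate m c ++ d) := by rw [← hsplit]
            _ = (c :: List.replicate m c) ++ d := rfl
            _ = (List.replicate m c ++ [c]) ++ d := by
                  rw [← List.replicate_succ, List.replicate_succ']
        have hcnt_d : ∀ x ∈ d,
            (List.replicate (m + 1) c ++ d).count x = d.count x := by
          intro x hx
          have hxc : x ≠ c := fun e => hnotin (e ▸ hx)
          rw [List.count_append, List.count_replicate]
          simp [hxc.symm]
        -- both sides
        rw [hstep, ihd]
        conv_rhs => rw [hfull]
        rw [List.all_append]
        have hrep : (List.replicate (m + 1) c).all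
            (fun x => decide (2 ≤ (List.replicate (m + 1) c ++ d).count x)) = true := by
          rw [List.all_eq_true]
          intro x hx
          rw [List.eq_of_mem_replicate hx]
          simp only [List.count_append, List.count_replicate, beq_self_eq_true,
            if_true, decide_eq_true_eq]
          omega
        rw [hrep, Bool.true_and]
        rw [Bool.eq_iff_iff, List.all_eq_true, List.all_eq_true]
        constructor
        · intro hh x hx
          rw [hcnt_d x hx]
          exact hh x hx
        · intro hh x hx
          rw [← hcnt_d x hx]
          exact hh x hx

-- a Bool 'all' over a predicate depending only on membership is invariant under
-- membership-equivalent lists (used to bridge dedup / sorted / original)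
lemma all_eq_of_mem_iff (l₁ l₂ : List Char) (f : Char → Bool)
    (h : ∀ c, c ∈ l₁ ↔ c ∈ l₂) : l₁.all f = l₂.all f := by
  cases h2 : l₂.all f with
  | false =>
    rcases List.all_eq_false.mp h2 with ⟨x, hx, hfx⟩
    exact List.all_eq_false.mpr ⟨x, (h x).mpr hx, hfx⟩
  | true =>
    rw [List.all_eq_true] at h2 ⊢
    exact fun x hx => h2 x ((h x).mp hx)

-- ===== VERDICT (by name: the statement is the Claim_ definition above) =====
theorem is_duplicates_spec : Claim_equal_is_duplicates := by
  intro s _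
  unfold Spec_is_duplicates is_duplicates is_duplicates_alt
  set l := s.toList with hl
  -- A's value
  have hA := isDupScan_inv l []
  simp only [List.nil_append] at hA
  have hstate : isDupScan l [] [] =
      (PySem.List.dedup l, (PySem.List.dedup l).map (fun c => decide (2 ≤ l.count c))) := by
    have h0 : PySem.List.dedup ([] : List Char) = [] := rfl
    rw [h0] at hA
    simpa using hA
  rw [hstate, isDupCheck_map]
  -- B's value
  have hperm : (PySem.List.sorted l (fun x => x) false).Perm l := PySem.List.sorted_perm ..
  have hp : (PySem.List.sorted l (fun x => x) false).Pairwise (· ≤ ·) := by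
    simpa using PySem.List.sorted_pairwise (xs := l) (key := fun x => x)
  rw [scanRuns_sorted_fuel _ _ (le_refl _) hp]
  have hcnt : ∀ c, (PySem.List.sorted l (fun x => x) false).count c = l.count c :=
    fun c => hperm.count_eq c
  have hfun : (fun c => decide (2 ≤ (PySem.List.sorted l (fun x => x) false).count c))
      = fun c => decide (2 ≤ l.count c) := by
    funext c; rw [hcnt c]
  rw [hfun]
  apply all_eq_of_mem_iff
  intro c
  rw [PySem.List.mem_dedup, hperm.mem_iff]
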